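-- pv_equiv track=rewrite | github.com/fuyutarow/procon | kickstart/3.py | solution
-- ===== SOURCE A (Python) =====
-- def is_palin(s):
--     left = 0
--     right = len(s) - 1
--     while left < right:
--         if "?" in [s[left], s[right]]:
--             left += 1
--             right -= 1
--         elif s[left] != s[right]:
--             return False
--         else:
--             left += 1
--             right -= 1
--     return True
--
-- def solution(s):
--     res = False
--     for i in range(len(s)):
--         for j in range(i + 1, len(s) + 1):
--             if not i + 5 <= j:
--                 continue
--
--             palin_enable = is_palin(s[i:j])
--             if not palin_enable:
--                 return "IMPOSSIBLE"
--     return "POSSIBLE"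
-- ===== SOURCE B (Python) =====
-- def solution(s):
--     n = len(s)
--     for p in range(n):
--         for q in range(p + 1, n):
--             a, b = s[p], s[q]
--             if a != '?' and b != '?' and a != b and 4 <= p + q <= 2 * n - 6:
--                 return "IMPOSSIBLE"
--     return "POSSIBLE"
-- ===== Notes on version B (the rewrite author's own statement) =====
-- stated objective: faster
-- what changed: A enumerates every substring of length >= 5 and runs a two-pointer wildcard-palindrome check on each (O(n^3)); B scans index pairs once and decides with a closed-form bound (4 <= p+q <= 2n-6) whether a mismatched non-wildcard pair is the symmetric pair of some in-bounds window of length >= 5 (O(n^2)).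
import Mathlib
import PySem

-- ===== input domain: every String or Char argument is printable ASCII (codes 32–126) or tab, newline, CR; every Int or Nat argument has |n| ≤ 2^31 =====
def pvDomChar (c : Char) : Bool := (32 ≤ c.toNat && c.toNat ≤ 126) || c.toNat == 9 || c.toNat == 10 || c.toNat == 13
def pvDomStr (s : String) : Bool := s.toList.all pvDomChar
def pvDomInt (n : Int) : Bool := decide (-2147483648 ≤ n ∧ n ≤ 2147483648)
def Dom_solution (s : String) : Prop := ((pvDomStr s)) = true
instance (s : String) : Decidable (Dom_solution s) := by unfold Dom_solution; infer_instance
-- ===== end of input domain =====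

-- B replaces A's O(n^3) enumeration of all length-≥5 substrings (each re-checked by a two-pointer
-- wildcard-palindrome scan) by a single O(n^2) scan over index pairs with a closed-form window test.

-- ===== PORT A =====
-- is_palin's while loop; s[left]/s[right] are always in range when reached (0 ≤ left < right ≤ len-1),
-- so getD is exact here.
def isPalinGo (s : List Char) (left right : Nat) : Bool :=
  if h : left < right then
    if s.getD left ' ' == '?' || s.getD right ' ' == '?' then
      isPalinGo s (left + 1) (right - 1)
    else if s.getD left ' ' != s.getD right ' ' then false
    else isPalinGo s (left + 1) (right - 1)
  else true
termination_by right - left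
decreasing_by all_goals omega

def isPalin (t : List Char) : Bool := isPalinGo t 0 (t.length - 1)

-- inner 'for j in range(i+1, len(s)+1)'; returns true iff the loop hit 'return "IMPOSSIBLE"'
def solGoJ (s : List Char) (n i j : Nat) : Bool :=
  if h : j ≤ n then
    if i + 5 ≤ j then
      if isPalin (PySem.List.slice s (some (i : Int)) (some (j : Int))) then solGoJ s n i (j + 1)
      else true
    else solGoJ s n i (j + 1)
  else false
termination_by n + 1 - j
decreasing_by all_goals omega

-- outer 'for i in range(len(s))'
def solGoI (s : List Char) (n i : Nat) : Bool :=
  if h : i < n then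
    if solGoJ s n i (i + 1) then true else solGoI s n (i + 1)
  else false
termination_by n - i
decreasing_by all_goals omega

def solution (s : String) : String :=
  if solGoI s.toList s.toList.length 0 then "IMPOSSIBLE" else "POSSIBLE"

-- ===== PORT B =====
-- inner 'for q in range(p+1, n)'.  Python's '4 <= p+q <= 2*n-6' (over ℤ) is written here as
-- 4 ≤ p+q ∧ p+q+6 ≤ 2*n to avoid ℕ subtraction truncation; the two are equivalent over ℤ.
def altGoQ (s : List Char) (n p q : Nat) : Bool :=
  if h : q < n then
    if (s.getD p ' ' != '?') && (s.getD q ' ' != '?') && (s.getD p ' ' != s.getD q ' ')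
        && decide (4 ≤ p + q) && decide (p + q + 6 ≤ 2 * n) then true
    else altGoQ s n p (q + 1)
  else false
termination_by n - q
decreasing_by all_goals omega

-- outer 'for p in range(n)'
def altGoP (s : List Char) (n p : Nat) : Bool :=
  if h : p < n then
    if altGoQ s n p (p + 1) then true else altGoP s n (p + 1)
  else false
termination_by n - p
decreasing_by all_goals omega

def solution_alt (s : String) : String :=
  if altGoP s.toList s.toList.length 0 then "IMPOSSIBLE" else "POSSIBLE"

-- ===== PRECONDITION & SPEC =====
def Spec_solution (s : String) (out : String) : Prop := out = solution_alt s
instance (s : String) (out : String) : Decidable (Spec_solution s out) := by unfold Spec_solution; infer_instance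

-- ===== CLAIM (what is proved, stated in full; the proofs are below) =====
def Claim_equal_solution : Prop := ∀ (s : String), Dom_solution s → Spec_solution s (solution s)

-- ===== LEMMAS AND PROOFS =====

-- a "hard" mismatched pair: neither side a wildcard, and the two characters differ
def PairBad (s : List Char) (a b : Nat) : Prop :=
  ¬ s.getD a ' ' = '?' ∧ ¬ s.getD b ' ' = '?' ∧ ¬ s.getD a ' ' = s.getD b ' '

theorem isPalinGo_false_iff (s : List Char) (l r : Nat) :
    isPalinGo s l r = false ↔ ∃ a b, l ≤ a ∧ a < b ∧ a + b = l + r ∧ PairBad s a b := by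
  fun_induction isPalinGo s l r with
  | case1 l r h hq ih =>
    rw [ih]
    simp only [beq_iff_eq, Bool.or_eq_true] at hq
    constructor
    · rintro ⟨a, b, ha, hab, hsum, bad⟩
      exact ⟨a, b, by omega, hab, by omega, bad⟩
    · rintro ⟨a, b, ha, hab, hsum, bad⟩
      rcases Nat.eq_or_lt_of_le ha with rfl | ha'
      · exfalso; obtain ⟨b1, b2, b3⟩ := bad
        have : b = r := by omega
        subst this
        rcases hq with hq | hq <;> [exact b1 hq; exact b2 hq]
      · exact ⟨a, b, by omega, hab, by omega, bad⟩
  | case2 l r h hq hne =>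
    simp only [beq_iff_eq, Bool.or_eq_true, not_or] at hq
    simp only [bne_iff_ne, ne_eq] at hne
    simp only [true_iff, ]
    exact ⟨l, r, le_refl l, h, rfl, hq.1, hq.2, hne⟩
  | case3 l r h hq hne ih =>
    rw [ih]
    simp only [beq_iff_eq, Bool.or_eq_true, not_or] at hq
    simp only [bne_iff_ne, ne_eq, not_not] at hne
    constructor
    · rintro ⟨a, b, ha, hab, hsum, bad⟩
      exact ⟨a, b, by omega, hab, by omega, bad⟩
    · rintro ⟨a, b, ha, hab, hsum, bad⟩
      rcases Nat.eq_or_lt_of_le ha with rfl | ha'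
      · exfalso
        have : b = r := by omega
        subst this
        exact bad.2.2 hne
      · exact ⟨a, b, by omega, hab, by omega, bad⟩
  | case4 l r h =>
    simp only [Bool.true_eq_false, false_iff]
    rintro ⟨a, b, ha, hab, hsum, _⟩
    omega

theorem isPalin_false_iff (t : List Char) :
    isPalin t = false ↔ ∃ a b, a < b ∧ a + b + 1 = t.length ∧ PairBad t a b := by
  unfold isPalin
  rw [isPalinGo_false_iff]
  constructor
  · rintro ⟨a, b, -, hab, hsum, bad⟩
    exact ⟨a, b, hab, by omega, bad⟩
  · rintro ⟨a, b, hab, hsum, bad⟩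
    exact ⟨a, b, Nat.zero_le a, hab, by omega, bad⟩


theorem slice_getD (s : List Char) (i j a : Nat) (h1 : i + a < j) (_h2 : j ≤ s.length) :
    ((s.drop i).take (j - i)).getD a ' ' = s.getD (i + a) ' ' := by
  have ha : a < j - i := by omega
  simp [List.getD, List.getElem?_drop, ha]


theorem slice_isPalin_false_iff (s : List Char) (i j : Nat) (hij : i ≤ j) (hj : j ≤ s.length) :
    isPalin (PySem.List.slice s (some (i : Int)) (some (j : Int))) = false ↔
      ∃ p q, i ≤ p ∧ p < q ∧ q < j ∧ p + q + 1 = i + j ∧ PairBad s p q := by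
  rw [PySem.List.slice_natCast]
  rw [isPalin_false_iff]
  have hlen : ((s.drop i).take (j - i)).length = j - i := by simp; omega
  constructor
  · rintro ⟨a, b, hab, hsum, bad⟩
    rw [hlen] at hsum
    obtain ⟨b1, b2, b3⟩ := bad
    rw [slice_getD s i j a (by omega) hj] at b1 b3
    rw [slice_getD s i j b (by omega) hj] at b2 b3
    exact ⟨i + a, i + b, by omega, by omega, by omega, by omega, b1, b2, b3⟩
  · rintro ⟨p, q, hip, hpq, hqj, hsum, b1, b2, b3⟩
    have hiq : i ≤ q := by omega
    have hp := slice_getD s i j (p - i) (by omega) hj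
    have hq := slice_getD s i j (q - i) (by omega) hj
    rw [Nat.add_sub_cancel' hip] at hp
    rw [Nat.add_sub_cancel' hiq] at hq
    refine ⟨p - i, q - i, by omega, by rw [hlen]; omega, ?_, ?_, ?_⟩
    · rw [hp]; exact b1
    · rw [hq]; exact b2
    · rw [hp, hq]; exact b3

theorem solGoJ_true_iff (s : List Char) (n i j : Nat) :
    solGoJ s n i j = true ↔ ∃ j', j ≤ j' ∧ j' ≤ n ∧ i + 5 ≤ j' ∧
      isPalin (PySem.List.slice s (some (i : Int)) (some (j' : Int))) = false := by
  fun_induction solGoJ s n i j with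
  | case1 j h h5 hp ih =>
    rw [ih]
    constructor
    · rintro ⟨j', h1, h2, h3, h4⟩; exact ⟨j', by omega, h2, h3, h4⟩
    · rintro ⟨j', h1, h2, h3, h4⟩
      rcases Nat.eq_or_lt_of_le h1 with rfl | h1'
      · exact absurd h4 (by simp [hp])
      · exact ⟨j', by omega, h2, h3, h4⟩
  | case2 j h h5 hp =>
    simp only [true_iff]
    exact ⟨j, le_refl j, h, h5, by simpa using hp⟩
  | case3 j h h5 ih =>
    rw [ih]
    constructor
    · rintro ⟨j', h1, h2, h3, h4⟩; exact ⟨j', by omega, h2, h3, h4⟩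
    · rintro ⟨j', h1, h2, h3, h4⟩
      exact ⟨j', by omega, h2, h3, h4⟩
  | case4 j h =>
    simp only [Bool.false_eq_true, false_iff]
    rintro ⟨j', h1, h2, -, -⟩; omega


theorem solGoI_true_iff (s : List Char) (n i : Nat) :
    solGoI s n i = true ↔ ∃ a j, i ≤ a ∧ a < n ∧ a + 1 ≤ j ∧ j ≤ n ∧ a + 5 ≤ j ∧
      isPalin (PySem.List.slice s (some (a : Int)) (some (j : Int))) = false := by
  fun_induction solGoI s n i with
  | case1 i h hj =>
    simp only [true_iff]
    obtain ⟨j, h1, h2, h3, h4⟩ := (solGoJ_true_iff s n i (i + 1)).mp hj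
    exact ⟨i, j, le_refl i, h, h1, h2, h3, h4⟩
  | case2 i h hj ih =>
    rw [ih]
    constructor
    · rintro ⟨a, j, h1, h2, h3, h4, h5, h6⟩; exact ⟨a, j, by omega, h2, h3, h4, h5, h6⟩
    · rintro ⟨a, j, h1, h2, h3, h4, h5, h6⟩
      rcases Nat.eq_or_lt_of_le h1 with rfl | h1'
      · exact absurd ((solGoJ_true_iff s n i (i + 1)).mpr ⟨j, h3, h4, h5, h6⟩) hj
      · exact ⟨a, j, by omega, h2, h3, h4, h5, h6⟩
  | case3 i h =>
    simp only [Bool.false_eq_true, false_iff]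
    rintro ⟨a, j, h1, h2, -⟩; omega


theorem altGoQ_true_iff (s : List Char) (n p q : Nat) :
    altGoQ s n p q = true ↔ ∃ q', q ≤ q' ∧ q' < n ∧ PairBad s p q' ∧
      4 ≤ p + q' ∧ p + q' + 6 ≤ 2 * n := by
  fun_induction altGoQ s n p q with
  | case1 q h hc =>
    simp only [Bool.and_eq_true, bne_iff_ne, ne_eq, decide_eq_true_eq] at hc
    simp only [true_iff]
    exact ⟨q, le_refl q, h, ⟨hc.1.1.1.1, hc.1.1.1.2, hc.1.1.2⟩, hc.1.2, hc.2⟩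
  | case2 q h hc ih =>
    rw [ih]
    constructor
    · rintro ⟨q', h1, h2, h3, h4, h5⟩; exact ⟨q', by omega, h2, h3, h4, h5⟩
    · rintro ⟨q', h1, h2, h3, h4, h5⟩
      rcases Nat.eq_or_lt_of_le h1 with rfl | h1'
      · refine absurd ?_ hc
        simp only [Bool.and_eq_true, bne_iff_ne, ne_eq, decide_eq_true_eq]
        exact ⟨⟨⟨⟨h3.1, h3.2.1⟩, h3.2.2⟩, h4⟩, h5⟩
      · exact ⟨q', by omega, h2, h3, h4, h5⟩
  | case3 q h =>
    simp only [Bool.false_eq_true, false_iff]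
    rintro ⟨q', h1, h2, -⟩; omega


theorem altGoP_true_iff (s : List Char) (n p : Nat) :
    altGoP s n p = true ↔ ∃ p' q, p ≤ p' ∧ p' + 1 ≤ q ∧ q < n ∧ PairBad s p' q ∧
      4 ≤ p' + q ∧ p' + q + 6 ≤ 2 * n := by
  fun_induction altGoP s n p with
  | case1 p h hq =>
    simp only [true_iff]
    obtain ⟨q, h1, h2, h3, h4, h5⟩ := (altGoQ_true_iff s n p (p + 1)).mp hq
    exact ⟨p, q, le_refl p, h1, h2, h3, h4, h5⟩
  | case2 p h hq ih =>
    rw [ih]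
    constructor
    · rintro ⟨p', q, h1, h2, h3, h4, h5, h6⟩; exact ⟨p', q, by omega, h2, h3, h4, h5, h6⟩
    · rintro ⟨p', q, h1, h2, h3, h4, h5, h6⟩
      rcases Nat.eq_or_lt_of_le h1 with rfl | h1'
      · exact absurd ((altGoQ_true_iff s n p (p + 1)).mpr ⟨q, h2, h3, h4, h5, h6⟩) hq
      · exact ⟨p', q, by omega, h2, h3, h4, h5, h6⟩
  | case3 p h =>
    simp only [Bool.false_eq_true, false_iff]
    rintro ⟨p', q, h1, h2, h3, -⟩; omega


theorem main_iff (s : List Char) :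
    solGoI s s.length 0 = altGoP s s.length 0 := by
  rw [Bool.eq_iff_iff, solGoI_true_iff, altGoP_true_iff]
  constructor
  · rintro ⟨a, j, -, h2, -, h4, h5, h6⟩
    obtain ⟨p, q, g1, g2, g3, g4, g5⟩ := (slice_isPalin_false_iff s a j (by omega) h4).mp h6
    exact ⟨p, q, Nat.zero_le p, g2, by omega, g5, by omega, by omega⟩
  · rintro ⟨p, q, -, h2, h3, h4, h5, h6⟩
    refine ⟨p + q + 1 - s.length, p + q + 1 - (p + q + 1 - s.length), Nat.zero_le _, by omega,
      by omega, by omega, by omega, ?_⟩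
    exact (slice_isPalin_false_iff s _ _ (by omega) (by omega)).mpr ⟨p, q, by omega, by omega, by omega, by omega, h4⟩


-- ===== VERDICT (by name: the statement is the Claim_ definition above) =====
theorem solution_spec : Claim_equal_solution := by
  unfold Claim_equal_solution
  intro s _
  unfold Spec_solution solution solution_alt
  rw [main_iff]
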